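-- pv_equiv track=rewrite | github.com/ssp4all/competitive-coding-algos | Interviews/robin-2021.py | countSawSubarrays
-- ===== SOURCE A (Python) =====
-- def countSawSubarrays(arr):
--     if len(arr) < 2:
--         return 0
--     if len(arr) == 2 and arr[0] != arr[1]:
--         return 1
--     elif len(arr) == 2 and arr[0] == arr[1]:
--         return 0
--     count = 0
--     for i in range(1, len(arr)):
--         prevdiff = arr[i] - arr[i-1]
--         if prevdiff != 0:
--             count += 1
--         for j in range(i+1, len(arr)):
--             newdiff = arr[j] - arr[j-1]
--             if (newdiff > 0 and prevdiff < 0) or (newdiff < 0 and prevdiff > 0):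
--                 count += 1
--                 prevdiff = newdiff
--             else:
--                 break
--     return count
-- ===== SOURCE B (Python) =====
-- def countSawSubarrays(arr):
--     # Single pass: run = number of zigzag subarrays ending at the current
--     # position; sum the runs.
--     total = 0
--     run = 0
--     prev = 0
--     for i in range(1, len(arr)):
--         d = arr[i] - arr[i - 1]
--         if d == 0:
--             run = 0
--         elif run > 0 and ((d > 0) != (prev > 0)):
--             run += 1
--         else:
--             run = 1
--         total += run
--         prev = d
--     return total
-- ===== Notes on version B (the rewrite author's own statement) =====
-- stated objective: faster
-- what changed: Replaced the nested loop that re-walks the zigzag chain from every start index with a single left-to-right pass maintaining the length of the alternating run ending at the current element (run-length DP) and summing it.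
import Mathlib
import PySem

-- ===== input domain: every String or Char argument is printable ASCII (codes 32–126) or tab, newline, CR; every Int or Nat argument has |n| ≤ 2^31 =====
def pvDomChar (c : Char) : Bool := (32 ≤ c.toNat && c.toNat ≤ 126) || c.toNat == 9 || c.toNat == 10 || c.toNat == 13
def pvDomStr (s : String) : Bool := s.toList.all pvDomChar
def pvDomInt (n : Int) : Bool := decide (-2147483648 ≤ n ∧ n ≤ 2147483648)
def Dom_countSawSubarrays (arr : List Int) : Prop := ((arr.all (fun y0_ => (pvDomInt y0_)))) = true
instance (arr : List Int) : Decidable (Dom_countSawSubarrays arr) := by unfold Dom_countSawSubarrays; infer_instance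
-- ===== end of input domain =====

-- B replaces A's quadratic chain-rescan with a single-pass run-length DP; return value proved equal on all inputs.

-- ===== PORT A =====
-- A's inner 'for j in range(i+1, len(arr))' loop with its break, transcribed
-- step for step (indices always in range, so pyGetD's default is never used).
def pvInnerA (arr : List Int) (js : List Int) (prevdiff count : Int) : Int :=
  match js with
  | [] => count
  | j :: js' =>
    let newdiff := PySem.List.pyGetD arr j 0 - PySem.List.pyGetD arr (j - 1) 0
    if (newdiff > 0 ∧ prevdiff < 0) ∨ (newdiff < 0 ∧ prevdiff > 0) then
      pvInnerA arr js' newdiff (count + 1)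
    else count

def countSawSubarrays (arr : List Int) : Int :=
  if arr.length < 2 then 0
  else if arr.length = 2 ∧ PySem.List.pyGetD arr 0 0 ≠ PySem.List.pyGetD arr 1 0 then 1
  else if arr.length = 2 ∧ PySem.List.pyGetD arr 0 0 = PySem.List.pyGetD arr 1 0 then 0
  else
    (PySem.List.pyRange 1 (arr.length : Int) 1).foldl (fun count i =>
      let prevdiff := PySem.List.pyGetD arr i 0 - PySem.List.pyGetD arr (i - 1) 0
      let count := if prevdiff ≠ 0 then count + 1 else count
      pvInnerA arr (PySem.List.pyRange (i + 1) (arr.length : Int) 1) prevdiff count) 0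

-- ===== PORT B =====
-- One step of B's loop body, on state (total, run, prev).
def pvStepB (s : Int × Int × Int) (d : Int) : Int × Int × Int :=
  let run := if d = 0 then 0
             else if 0 < s.2.1 ∧ ((0 < d) ≠ (0 < s.2.2)) then s.2.1 + 1
             else 1
  (s.1 + run, run, d)

def countSawSubarrays_alt (arr : List Int) : Int :=
  ((PySem.List.pyRange 1 (arr.length : Int) 1).foldl (fun s i =>
    pvStepB s (PySem.List.pyGetD arr i 0 - PySem.List.pyGetD arr (i - 1) 0)) (0, 0, 0)).1

-- ===== PRECONDITION & SPEC =====
def Spec_countSawSubarrays (arr : List Int) (out : Int) : Prop := out = countSawSubarrays_alt arr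
instance (arr : List Int) (out : Int) : Decidable (Spec_countSawSubarrays arr out) := by unfold Spec_countSawSubarrays; infer_instance

-- ===== CLAIM (what is proved, stated in full; the proofs are below) =====
def Claim_equal_countSawSubarrays : Prop := ∀ (arr : List Int), Dom_countSawSubarrays arr → Spec_countSawSubarrays arr (countSawSubarrays arr)

-- ===== LEMMAS AND PROOFS =====

-- The list of adjacent differences: pvDiffs arr [k] = arr[k+1] - arr[k].
def pvDiffs (arr : List Int) : List Int := List.zipWith (fun a b => b - a) arr arr.tail

-- Length of the alternating chain that p can be extended by into ds (A's inner loop count).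
def pvChain (p : Int) : List Int → Int
  | [] => 0
  | d :: ds => if (0 < d ∧ p < 0) ∨ (d < 0 ∧ 0 < p) then 1 + pvChain d ds else 0

-- Reference count over a diff list: for each suffix, 1 if its head is a
-- nonzero diff, plus the alternating chain it starts.
def pvSA : List Int → Int
  | [] => 0
  | d :: ds => (if d ≠ 0 then 1 else 0) + pvChain d ds + pvSA ds

theorem pvDiffs_length (arr : List Int) : (pvDiffs arr).length = arr.length - 1 := by
  cases arr with
  | nil => simp [pvDiffs]
  | cons a t => simp [pvDiffs]

theorem pvDiff_getElem (arr : List Int) (i : Nat) (h1 : 1 ≤ i) (h2 : i < arr.length) :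
    PySem.List.pyGetD arr (i : Int) 0 - PySem.List.pyGetD arr ((i : Int) - 1) 0
      = (pvDiffs arr)[i - 1]'(by rw [pvDiffs_length]; omega) := by
  have hcast : ((i : Int) - 1) = ((i - 1 : Nat) : Int) := by omega
  rw [hcast, PySem.List.pyGetD_natCast, PySem.List.pyGetD_natCast,
      List.getD_eq_getElem _ _ h2, List.getD_eq_getElem _ _ (by omega)]
  simp only [pvDiffs, List.getElem_zipWith, List.getElem_tail]
  congr 1
  congr 1
  omega

theorem pvChain_zero (ds : List Int) : pvChain 0 ds = 0 := by
  cases ds with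
  | nil => rfl
  | cons d t => simp [pvChain]

-- A's inner loop computes count + chain length.
theorem pvInnerA_eq (arr : List Int) (m : Nat) :
    ∀ (i : Nat) (p c : Int), 1 ≤ i → arr.length ≤ i + 1 + m →
    pvInnerA arr (PySem.List.pyRange ((i : Int) + 1) (arr.length : Int) 1) p c
      = c + pvChain p ((pvDiffs arr).drop i) := by
  induction m with
  | zero =>
    intro i p c hi hlen
    have h1 : ((arr.length : Int) ≤ (i : Int) + 1) := by omega
    rw [PySem.List.pyRange_one_eq_nil h1]
    have : (pvDiffs arr).drop i = [] := by
      apply List.drop_eq_nil_of_le; rw [pvDiffs_length]; omega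
    simp [pvInnerA, this, pvChain]
  | succ m ih =>
    intro i p c hi hlen
    by_cases hlt : (i : Int) + 1 < (arr.length : Int)
    · rw [PySem.List.pyRange_one_cons hlt]
      have hd : (i : Int) + 1 = ((i + 1 : Nat) : Int) := by omega
      have hget := pvDiff_getElem arr (i + 1) (by omega) (by omega)
      have hdi : i < (pvDiffs arr).length := by rw [pvDiffs_length]; omega
      have hdrop : (pvDiffs arr).drop i
          = (pvDiffs arr)[i]'hdi :: (pvDiffs arr).drop (i + 1) :=
        List.drop_eq_getElem_cons hdi
      simp only [pvInnerA, hd, hget]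
      have hidx : i + 1 - 1 = i := by omega
      rw [hdrop]
      simp only [pvChain, hidx]
      by_cases halt : (0 < (pvDiffs arr)[i]'hdi ∧ p < 0) ∨
          ((pvDiffs arr)[i]'hdi < 0 ∧ 0 < p)
      · rw [if_pos halt, if_pos halt, ih (i + 1) _ (c + 1) (by omega) (by omega)]
        ring
      · rw [if_neg halt, if_neg halt]; ring
    · rw [PySem.List.pyRange_one_eq_nil (by omega)]
      have : (pvDiffs arr).drop i = [] := by
        apply List.drop_eq_nil_of_le; rw [pvDiffs_length]; omega
      simp [pvInnerA, this, pvChain]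

-- B's loop with state (t, r, p): invariant 0 < r ↔ p ≠ 0.
theorem pvLoopB_eq (arr : List Int) (m : Nat) :
    ∀ (i : Nat) (t r p : Int), 1 ≤ i → arr.length ≤ i + m →
    (0 < r ↔ p ≠ 0) →
    ((PySem.List.pyRange (i : Int) (arr.length : Int) 1).foldl (fun s j =>
        pvStepB s (PySem.List.pyGetD arr j 0 - PySem.List.pyGetD arr (j - 1) 0)) (t, r, p)).1
      = t + pvSA ((pvDiffs arr).drop (i - 1)) + r * pvChain p ((pvDiffs arr).drop (i - 1)) := by
  induction m with
  | zero =>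
    intro i t r p hi hlen hinv
    have hL := pvDiffs_length arr
    rw [PySem.List.pyRange_one_eq_nil (by omega)]
    have : (pvDiffs arr).drop (i - 1) = [] := by
      apply List.drop_eq_nil_of_le; omega
    simp [this, pvSA, pvChain]
  | succ m ih =>
    intro i t r p hi hlen hinv
    have hL := pvDiffs_length arr
    by_cases hlt : (i : Int) < (arr.length : Int)
    · rw [PySem.List.pyRange_one_cons hlt]
      have hget := pvDiff_getElem arr i hi (by omega)
      have hdi : i - 1 < (pvDiffs arr).length := by omega
      set d := (pvDiffs arr)[i - 1]'hdi with hdDef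
      have hdrop : (pvDiffs arr).drop (i - 1) = d :: (pvDiffs arr).drop i := by
        have h1 : i - 1 + 1 = i := by omega
        rw [List.drop_eq_getElem_cons hdi, h1]
      simp only [List.foldl_cons, hget]
      set C := pvChain d ((pvDiffs arr).drop i) with hC
      have hnext : ∀ r' : Int, (0 < r' ↔ d ≠ 0) →
          ((PySem.List.pyRange ((i : Int) + 1) (arr.length : Int) 1).foldl (fun s j =>
            pvStepB s (PySem.List.pyGetD arr j 0 - PySem.List.pyGetD arr (j - 1) 0)) (t + r', r', d)).1
          = t + r' + pvSA ((pvDiffs arr).drop i) + r' * C := by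
        intro r' hinv'
        have hcast : ((i : Int) + 1) = ((i + 1 : Nat) : Int) := by omega
        rw [hcast, ih (i + 1) (t + r') r' d (by omega) (by omega) hinv']
        rw [Nat.add_sub_cancel, ← hC]
      by_cases hd0 : d = 0
      · have hstep : pvStepB (t, r, p) d = (t + 0, 0, d) := by
          simp [pvStepB, hd0]
        rw [hstep, hnext 0 (by simp [hd0])]
        rw [hdrop]
        simp only [pvSA, pvChain, hd0]
        rw [pvChain_zero]
        simp
      · by_cases halt : (0 < d ∧ p < 0) ∨ (d < 0 ∧ 0 < p)
        · have hp0 : p ≠ 0 := by rcases halt with ⟨_, h⟩ | ⟨_, h⟩ <;> omega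
          have hr : 0 < r := hinv.mpr hp0
          have hsign : (0 < d) ≠ (0 < p) := by
            rcases halt with ⟨h1, h2⟩ | ⟨h1, h2⟩ <;> simp [h1, h2] <;> omega
          have hstep : pvStepB (t, r, p) d = (t + (r + 1), r + 1, d) := by
            simp only [pvStepB]
            rw [if_neg hd0, if_pos ⟨hr, hsign⟩]
          rw [hstep, hnext (r + 1) (by constructor <;> intro <;> [exact hd0; omega])]
          rw [hdrop]
          simp only [pvSA, pvChain, ← hC, if_pos halt, if_pos hd0]
          ring
        · have hnb : ¬ (0 < r ∧ ((0 < d) ≠ (0 < p))) := by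
            rintro ⟨hr, hsign⟩
            have hp0 : p ≠ 0 := hinv.mp hr
            apply halt
            by_cases hdp : 0 < d
            · left
              refine ⟨hdp, ?_⟩
              have : ¬ (0 < p) := by simpa [hdp] using hsign
              omega
            · right
              refine ⟨by omega, ?_⟩
              by_contra hcon
              exact hsign (by simp [hdp]; omega)
          have hstep : pvStepB (t, r, p) d = (t + 1, 1, d) := by
            simp only [pvStepB]
            rw [if_neg hd0, if_neg hnb]
          rw [hstep, hnext 1 (by simp [hd0])]
          rw [hdrop]
          simp only [pvSA, pvChain, ← hC, if_neg halt, if_pos hd0]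
          ring
    · rw [PySem.List.pyRange_one_eq_nil (by omega)]
      have : (pvDiffs arr).drop (i - 1) = [] := by
        apply List.drop_eq_nil_of_le; omega
      simp [this, pvSA, pvChain]

-- A's outer loop, by the same drop-suffix induction.
theorem pvOuterA_eq (arr : List Int) (m : Nat) :
    ∀ (i : Nat) (c : Int), 1 ≤ i → arr.length ≤ i + m →
    (PySem.List.pyRange (i : Int) (arr.length : Int) 1).foldl (fun count j =>
        let prevdiff := PySem.List.pyGetD arr j 0 - PySem.List.pyGetD arr (j - 1) 0
        let count := if prevdiff ≠ 0 then count + 1 else count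
        pvInnerA arr (PySem.List.pyRange (j + 1) (arr.length : Int) 1) prevdiff count) c
      = c + pvSA ((pvDiffs arr).drop (i - 1)) := by
  induction m with
  | zero =>
    intro i c hi hlen
    have hL := pvDiffs_length arr
    rw [PySem.List.pyRange_one_eq_nil (by omega)]
    have : (pvDiffs arr).drop (i - 1) = [] := by
      apply List.drop_eq_nil_of_le; omega
    simp [this, pvSA]
  | succ m ih =>
    intro i c hi hlen
    have hL := pvDiffs_length arr
    by_cases hlt : (i : Int) < (arr.length : Int)
    · rw [PySem.List.pyRange_one_cons hlt]
      have hget := pvDiff_getElem arr i hi (by omega)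
      have hdi : i - 1 < (pvDiffs arr).length := by omega
      set d := (pvDiffs arr)[i - 1]'hdi with hdDef
      have hdrop : (pvDiffs arr).drop (i - 1) = d :: (pvDiffs arr).drop i := by
        have h1 : i - 1 + 1 = i := by omega
        rw [List.drop_eq_getElem_cons hdi, h1]
      simp only [List.foldl_cons, hget]
      rw [pvInnerA_eq arr m i d _ (by omega) (by omega)]
      have hcast : ((i : Int) + 1) = ((i + 1 : Nat) : Int) := by omega
      rw [hcast, ih (i + 1) _ (by omega) (by omega)]
      rw [hdrop]
      simp only [pvSA, Nat.add_sub_cancel]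
      by_cases hd0 : d ≠ 0
      · rw [if_pos hd0, if_pos hd0]; ring
      · rw [if_neg hd0, if_neg hd0]; ring
    · rw [PySem.List.pyRange_one_eq_nil (by omega)]
      have : (pvDiffs arr).drop (i - 1) = [] := by
        apply List.drop_eq_nil_of_le; omega
      simp [this, pvSA]

theorem pvAlt_eq_SA (arr : List Int) : countSawSubarrays_alt arr = pvSA (pvDiffs arr) := by
  unfold countSawSubarrays_alt
  have := pvLoopB_eq arr arr.length 1 0 0 0 (le_refl 1) (by omega) (by simp)
  simpa [pvChain_zero] using this

-- ===== VERDICT (by name: the statement is the Claim_ definition above) =====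
theorem countSawSubarrays_spec : Claim_equal_countSawSubarrays := by
  intro arr _
  unfold Spec_countSawSubarrays
  rw [pvAlt_eq_SA]
  unfold countSawSubarrays
  by_cases h2 : arr.length < 2
  · rw [if_pos h2]
    have : (pvDiffs arr).length = 0 := by rw [pvDiffs_length]; omega
    rw [List.length_eq_zero_iff.mp this]; rfl
  · rw [if_neg h2]
    by_cases hlen2 : arr.length = 2
    · obtain ⟨a, b, rfl⟩ := List.length_eq_two.mp hlen2
      by_cases hab : a = b
      · subst hab
        simp [pvDiffs, pvSA, pvChain, PySem.List.pyGetD]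
      · have hne : (b : Int) - a ≠ 0 := sub_ne_zero.mpr (fun h => hab (by omega))
        simp [pvDiffs, pvSA, pvChain, PySem.List.pyGetD, hab, hne]
    · have hx : ¬ ((List.length arr = 2) ∧ PySem.List.pyGetD arr 0 0 ≠ PySem.List.pyGetD arr 1 0) := by
        intro h; exact hlen2 h.1
      have hy : ¬ ((List.length arr = 2) ∧ PySem.List.pyGetD arr 0 0 = PySem.List.pyGetD arr 1 0) := by
        intro h; exact hlen2 h.1
      rw [if_neg hx, if_neg hy]
      have := pvOuterA_eq arr arr.length 1 0 (le_refl 1) (by omega)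
      simpa using this
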